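-- pv_equiv track=rewrite | github.com/mistrzegiptu/WDI | zestaw4/zad12.py | plaster
-- ===== SOURCE A (Python) =====
-- def isComposite(n):
--     if n == 1 or n == 2:
--         return 0
--
--     i = 2
--     while i*i <= n:
--         if n % i == 0:
--             return True
--         i += 1
--
--     return False
--
-- def plaster(T):
--     n = len(T)
--     L = [[0 for _ in range(n)] for _ in range(n)]
--
--     for i in range(n):
--         for j in range(n):
--             L[i][j] = isComposite(T[i][j])
--
--
--     counter = 0
--
--     for i in range(1, n-1):
--         for j in range(1, n-1):
--             li = -L[i][j]
--
--             for i1 in range(i-1, i+2):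
--                 for j1 in range(j-1, j+2):
--                     li += L[i1][j1]
--
--             if li >= 6:
--                 counter += 1
--
--     return counter
-- ===== SOURCE B (Python) =====
-- def isComposite(n):
--     if n == 1 or n == 2:
--         return 0
--
--     i = 2
--     while i*i <= n:
--         if n % i == 0:
--             return True
--         i += 1
--
--     return False
--
--
-- def plaster(T):
--     # Separable 3x3 filter: horizontal window sums per row, then combine
--     # three row-sums vertically and subtract the center.
--     n = len(T)
--     L = [[1 if isComposite(x) else 0 for x in row[:n]] for row in T]
--     R = [[a + b + c for a, b, c in zip(row, row[1:], row[2:])] for row in L]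
--     return sum(1
--                for i in range(1, n - 1)
--                for j in range(n - 2)
--                if R[i-1][j] + R[i][j] + R[i+1][j] - L[i][j+1] >= 6)
-- ===== Notes on version B (the rewrite author's own statement) =====
-- stated objective: faster
-- what changed: Replaces A's per-cell 3x3 nested neighborhood scan (9 indexed reads per interior cell) with a separable filter: one pass of horizontal 3-window sums per row, then each cell's 8-neighbor count is three row-sum lookups minus the center.
import Mathlib
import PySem

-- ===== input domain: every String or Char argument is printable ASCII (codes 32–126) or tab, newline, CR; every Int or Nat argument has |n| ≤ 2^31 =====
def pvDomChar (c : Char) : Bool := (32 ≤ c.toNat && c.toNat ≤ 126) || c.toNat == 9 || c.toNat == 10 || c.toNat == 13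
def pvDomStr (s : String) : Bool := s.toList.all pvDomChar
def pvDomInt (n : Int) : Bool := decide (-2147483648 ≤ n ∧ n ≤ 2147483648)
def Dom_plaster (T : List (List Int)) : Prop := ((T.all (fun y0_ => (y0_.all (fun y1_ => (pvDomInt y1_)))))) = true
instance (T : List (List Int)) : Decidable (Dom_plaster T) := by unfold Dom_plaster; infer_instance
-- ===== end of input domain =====

-- B replaces A's per-cell 3×3 double scan by a separable filter (per-row horizontal
-- window sums, then three row lookups per cell); return values agree on Pre_ (rows at
-- least as long as the number of rows, exactly where A does not raise IndexError).

-- ===== PORT A =====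
-- isComposite's while loop, as fuel recursion; fuel n.toNat is exact: for n ≥ 3 the loop
-- runs at most √n < n.toNat times, and for n ≤ 2 (fuel 0 or early return) the loop body
-- never fires in Python either, so returning 0 at fuel 0 matches.
-- Python's isComposite returns 0 / True / False, used only arithmetically: ported as 0 / 1 / 0.
def isCompLoop (n i : Int) : Nat → Int
  | 0 => 0
  | fuel+1 =>
    if i * i ≤ n then (if PySem.Int.mod n i = 0 then 1 else isCompLoop n (i+1) fuel) else 0

def isCompositeInt (n : Int) : Int :=
  if n = 1 ∨ n = 2 then 0 else isCompLoop n 2 n.toNat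

-- Python list assignment L[i][v] for an index known to be in range (exact there).
def setAt {α : Type} (xs : List α) (i : Int) (v : α) : List α := xs.set i.toNat v

def plaster (T : List (List Int)) : Int :=
  let n : Int := T.length
  let L0 : List (List Int) :=
    (PySem.List.pyRange 0 n 1).map (fun _ => (PySem.List.pyRange 0 n 1).map (fun _ => (0:Int)))
  let L : List (List Int) :=
    (PySem.List.pyRange 0 n 1).foldl (fun L i =>
      (PySem.List.pyRange 0 n 1).foldl (fun L j =>
        setAt L i (setAt (PySem.List.pyGetD L i [])
          j (isCompositeInt (PySem.List.pyGetD (PySem.List.pyGetD T i []) j 0)))) L) L0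
  (PySem.List.pyRange 1 (n-1) 1).foldl (fun counter i =>
    (PySem.List.pyRange 1 (n-1) 1).foldl (fun counter j =>
      let li : Int :=
        (PySem.List.pyRange (i-1) (i+2) 1).foldl (fun li i1 =>
          (PySem.List.pyRange (j-1) (j+2) 1).foldl (fun li j1 =>
            li + PySem.List.pyGetD (PySem.List.pyGetD L i1 []) j1 0) li)
          (-(PySem.List.pyGetD (PySem.List.pyGetD L i []) j 0))
      if 6 ≤ li then counter + 1 else counter) counter) 0

-- ===== PORT B =====
def plaster_alt (T : List (List Int)) : Int :=
  let n : Int := T.length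
  let L : List (List Int) :=
    T.map (fun row =>
      (PySem.List.slice row (some 0) (some n)).map
        (fun x => if isCompositeInt x ≠ 0 then (1:Int) else 0))
  let R : List (List Int) :=
    L.map (fun row =>
      List.zipWith3 (fun a b c => a + b + c) row
        (PySem.List.slice row (some 1) none) (PySem.List.slice row (some 2) none))
  (PySem.List.pyRange 1 (n-1) 1).foldl (fun acc i =>
    (PySem.List.pyRange 0 (n-2) 1).foldl (fun acc j =>
      if 6 ≤ PySem.List.pyGetD (PySem.List.pyGetD R (i-1) []) j 0
           + PySem.List.pyGetD (PySem.List.pyGetD R i []) j 0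
           + PySem.List.pyGetD (PySem.List.pyGetD R (i+1) []) j 0
           - PySem.List.pyGetD (PySem.List.pyGetD L i []) (j+1) 0
      then acc + 1 else acc) acc) 0

-- ===== PRECONDITION & SPEC =====
-- Pre_: every row has at least len(T) entries — exactly the inputs where Python A's
-- T[i][j] reads (i, j < len(T)) never raise IndexError.
def Pre_plaster (T : List (List Int)) : Prop := ∀ row ∈ T, T.length ≤ row.length
instance (T : List (List Int)) : Decidable (Pre_plaster T) := by unfold Pre_plaster; infer_instance
def pvWitness_plaster : List (List Int) := [[4, 6, 8], [9, 5, 10], [12, 14, 15]]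

def Spec_plaster (T : List (List Int)) (out : Int) : Prop := out = plaster_alt T
instance (T : List (List Int)) (out : Int) : Decidable (Spec_plaster T out) := by unfold Spec_plaster; infer_instance

-- ===== CLAIM (what is proved, stated in full; the proofs are below) =====
def Claim_equal_plaster : Prop := ∀ (T : List (List Int)), Dom_plaster T → Pre_plaster T → Spec_plaster T (plaster T)

-- ===== LEMMAS AND PROOFS =====

-- isCompositeInt only takes the values 0 and 1.
theorem isCompLoop_01 (n : Int) : ∀ (i : Int) (fuel : Nat), isCompLoop n i fuel = 0 ∨ isCompLoop n i fuel = 1 := by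
  intro i fuel
  induction fuel generalizing i with
  | zero => left; rfl
  | succ f ih =>
    simp only [isCompLoop]
    split_ifs with h1 h2
    · right; rfl
    · exact ih (i+1)
    · left; rfl

theorem isCompositeInt_01 (n : Int) : isCompositeInt n = 0 ∨ isCompositeInt n = 1 := by
  unfold isCompositeInt
  split_ifs
  · left; rfl
  · exact isCompLoop_01 n 2 n.toNat

theorem ite_ne_zero_eq (x : Int) (h : x = 0 ∨ x = 1) :
    (if x ≠ 0 then (1:Int) else 0) = x := by
  rcases h with h | h <;> simp [h]

-- the cell value both programs compute at (i, j)
def cellF (T : List (List Int)) (i j : Nat) : Int :=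
  isCompositeInt ((T.getD i []).getD j 0)

-- the composite mask A builds imperatively
def maskM (T : List (List Int)) : List (List Int) :=
  (List.range T.length).map (fun i => (List.range T.length).map (fun j => cellF T i j))

-- writing g j into slots 0..k-1 of a row
theorem rowfold_eq (g : Nat → Int) :
    ∀ (k : Nat) (r0 : List Int), k ≤ r0.length →
      (List.range k).foldl (fun r j => r.set j (g j)) r0 = (List.range k).map g ++ r0.drop k := by
  intro k
  induction k with
  | zero => intro r0 _; simp
  | succ k ih =>
    intro r0 hk
    rw [List.range_succ, List.foldl_append, ih r0 (by omega)]
    simp only [List.foldl]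
    rw [List.set_append_right _ _ (by simp), List.drop_eq_getElem_cons (by omega : k < r0.length)]
    simp only [List.length_map, List.length_range, Nat.sub_self, List.set_cons_zero]
    simp

-- a loop writing only into row i of the matrix acts on that row alone
theorem liftrow_eq (g : Nat → Int) :
    ∀ (js : List Nat) (L : List (List Int)) (i : Nat), i < L.length →
      js.foldl (fun L j => L.set i ((L.getD i []).set j (g j))) L
        = L.set i (js.foldl (fun r j => r.set j (g j)) (L.getD i [])) := by
  intro js
  induction js with
  | nil =>
    intro L i hi
    simp only [List.foldl]
    rw [List.getD_eq_getElem _ _ hi, List.set_getElem_self]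
  | cons j js ih =>
    intro L i hi
    simp only [List.foldl]
    rw [ih _ i (by simpa using hi), List.set_set]
    congr 1
    rw [List.getD_eq_getElem _ _ (by simpa using hi), List.getElem_set_self,
        List.getD_eq_getElem _ _ hi]

-- A's double write loop produces the mask
theorem maskfold_eq (g : Nat → Nat → Int) (N : Nat) :
    ∀ (k : Nat), k ≤ N →
      (List.range k).foldl
        (fun L i => (List.range N).foldl (fun L j => L.set i ((L.getD i []).set j (g i j))) L)
        ((List.range N).map (fun _ => (List.range N).map (fun _ => (0:Int))))
      = (List.range k).map (fun i => (List.range N).map (g i))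
          ++ ((List.range N).map (fun _ => (List.range N).map (fun _ => (0:Int)))).drop k := by
  intro k
  induction k with
  | zero => simp
  | succ k ih =>
    intro hk
    rw [List.range_succ, List.foldl_append, ih (by omega)]
    simp only [List.foldl]
    have hlen : ((List.range N).map (fun _ => (List.range N).map (fun _ => (0:Int)))).length = N := by simp
    have hklt : k < ((List.range N).map (fun _ => (List.range N).map (fun _ => (0:Int)))).length := by
      rw [hlen]; omega
    have hrow : ((List.range k).map (fun i => (List.range N).map (g i))
          ++ ((List.range N).map (fun _ => (List.range N).map (fun _ => (0:Int)))).drop k).getD k []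
        = (List.range N).map (fun _ => (0:Int)) := by
      rw [List.getD_append_right _ _ _ _ (by simp), List.drop_eq_getElem_cons hklt]
      simp
    rw [liftrow_eq _ _ _ k (by simp; omega), hrow, rowfold_eq _ _ _ (by simp)]
    rw [List.set_append_right _ _ (by simp),
        List.drop_eq_getElem_cons hklt]
    simp only [List.length_map, List.length_range, Nat.sub_self, List.set_cons_zero]
    simp

-- reading the mask
theorem maskM_getD (T : List (List Int)) (i j : Nat) (hi : i < T.length) (hj : j < T.length) :
    ((maskM T).getD i []).getD j 0 = cellF T i j := by
  unfold maskM
  rw [PySem.List.getD_map_range _ _ _ _ hi, PySem.List.getD_map_range _ _ _ _ hj]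

-- B's horizontal window sums, read back
theorem zw3_getD :
    ∀ (k : Nat) (xs : List Int), k + 2 < xs.length →
      (List.zipWith3 (fun a b c => a + b + c) xs (xs.drop 1) (xs.drop 2)).getD k 0
        = xs.getD k 0 + xs.getD (k+1) 0 + xs.getD (k+2) 0 := by
  intro k
  induction k with
  | zero =>
    intro xs h
    match xs, h with
    | a :: b :: c :: r, _ => simp [List.zipWith3]
  | succ k ih =>
    intro xs h
    match xs, h with
    | a :: b :: c :: r, h =>
      have := ih (b :: c :: r) (by simp at h ⊢; omega)
      simpa [List.zipWith3] using this

-- range-normalisation helpers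
theorem pvRange0 (N : Nat) :
    PySem.List.pyRange 0 (N:Int) 1 = (List.range N).map (fun k : Nat => (0:Int) + ↑k) := by
  rw [PySem.List.pyRange_one, show ((N:Int)-0).toNat = N by omega]

theorem pvRange1 (N : Nat) :
    PySem.List.pyRange 1 ((N:Int)-1) 1 = (List.range (N-2)).map (fun k : Nat => (1:Int) + ↑k) := by
  rw [PySem.List.pyRange_one, show ((N:Int)-1-1).toNat = N-2 by omega]

theorem pvRange02 (N : Nat) :
    PySem.List.pyRange 0 ((N:Int)-2) 1 = (List.range (N-2)).map (fun k : Nat => (0:Int) + ↑k) := by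
  rw [PySem.List.pyRange_one, show ((N:Int)-2-0).toNat = N-2 by omega]

theorem pvRange_three (a : Int) : PySem.List.pyRange (a-1) (a+2) 1 = [a-1, a, a+1] := by
  rw [PySem.List.pyRange_one, show (a+2-(a-1)).toNat = 3 by omega]
  simp [List.range_succ]
  ring_nf

-- getD through map
theorem getD_map' {α β : Type} (f : α → β) (l : List α) (i : Nat) (d : β) (h : i < l.length) :
    (l.map f).getD i d = f l[i] := by
  rw [List.getD_eq_getElem _ _ (by simpa using h), List.getElem_map]

-- B's composite mask, read back
theorem LB_getD (T : List (List Int)) (hPre : Pre_plaster T) (i j : Nat)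
    (hi : i < T.length) (hj : j < T.length) :
    ((T.map (fun row => (PySem.List.slice row (some 0) (some (T.length:Int))).map
        (fun x => if isCompositeInt x ≠ 0 then (1:Int) else 0))).getD i []).getD j 0
      = cellF T i j := by
  have hrow : T.length ≤ T[i].length := hPre _ (T.getElem_mem hi)
  rw [getD_map' _ _ _ _ hi]
  simp only [PySem.List.slice_zero_start, PySem.List.slice_to_natCast]
  rw [getD_map' _ _ _ _ (by simp [List.length_take]; omega)]
  rw [List.getElem_take]
  rw [ite_ne_zero_eq _ (isCompositeInt_01 _)]
  unfold cellF
  rw [List.getD_eq_getElem _ _ hi, List.getD_eq_getElem _ _ (by omega)]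

-- B's row of horizontal window sums, read back
theorem RB_getD (T : List (List Int)) (hPre : Pre_plaster T) (i q : Nat)
    (hi : i < T.length) (hq : q + 2 < T.length) :
    (((T.map (fun row => (PySem.List.slice row (some 0) (some (T.length:Int))).map
          (fun x => if isCompositeInt x ≠ 0 then (1:Int) else 0))).map
        (fun row => List.zipWith3 (fun a b c => a + b + c) row
          (PySem.List.slice row (some 1) none) (PySem.List.slice row (some 2) none))).getD i []).getD q 0
      = cellF T i q + cellF T i (q+1) + cellF T i (q+2) := by
  have hrow : T.length ≤ T[i].length := hPre _ (T.getElem_mem hi)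
  set LB := T.map (fun row => (PySem.List.slice row (some 0) (some (T.length:Int))).map
      (fun x => if isCompositeInt x ≠ 0 then (1:Int) else 0)) with hLBdef
  have hi' : i < LB.length := by simp [hLBdef]; omega
  rw [getD_map' _ _ _ _ hi']
  rw [PySem.List.slice_from _ (by norm_num : (0:Int) ≤ 1),
      PySem.List.slice_from _ (by norm_num : (0:Int) ≤ 2)]
  simp only [show ((1:Int)).toNat = 1 from rfl, show ((2:Int)).toNat = 2 from rfl]
  have hm : (LB[i]'hi').length = T.length := by
    simp [hLBdef, PySem.List.slice_zero_start, PySem.List.slice_to_natCast]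
    omega
  rw [zw3_getD q _ (by rw [hm]; omega)]
  have hGD : LB.getD i [] = LB[i]'hi' := List.getD_eq_getElem _ _ hi'
  have hg : ∀ j : Nat, j < T.length → (LB[i]'hi').getD j 0 = cellF T i j := by
    intro j hj
    rw [← hGD]
    exact LB_getD T hPre i j hi hj
  rw [hg q (by omega), hg (q+1) (by omega), hg (q+2) (by omega)]

-- ===== VERDICT (by name: the statement is the Claim_ definition above) =====
theorem plaster_spec : Claim_equal_plaster := by
  intro T _ hPre
  simp only [Spec_plaster, plaster, plaster_alt, pvRange0, pvRange1, pvRange02,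
    List.foldl_map, setAt, PySem.List.pyGetD_natCast, zero_add, Int.toNat_natCast]
  rw [show (List.map (fun _ => List.map (fun _ => (0:Int)) (List.map (fun k : Nat => (k:Int)) (List.range T.length))) (List.map (fun k : Nat => (k:Int)) (List.range T.length))) = (List.range T.length).map (fun _ => (List.range T.length).map (fun _ => (0:Int))) by
    rw [List.map_const', List.map_const', List.map_const', List.map_const']
    simp]
  have hL : (List.range T.length).foldl
      (fun L i => (List.range T.length).foldl
        (fun L j => L.set i ((L.getD i []).set j (isCompositeInt ((T.getD i []).getD j 0)))) L)
      ((List.range T.length).map (fun _ => (List.range T.length).map (fun _ => (0:Int))))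
      = maskM T := by
    rw [maskfold_eq (fun i j => isCompositeInt ((T.getD i []).getD j 0)) T.length T.length le_rfl]
    simp [maskM, cellF]
  rw [hL]
  apply PySem.List.foldl_congr_mem
  intro acc p hp
  apply PySem.List.foldl_congr_mem
  intro acc' q hq
  have hp' : p < T.length - 2 := List.mem_range.mp hp
  have hq' : q < T.length - 2 := List.mem_range.mp hq
  rw [pvRange_three (1 + (p:Int)), pvRange_three (1 + (q:Int))]
  simp only [List.foldl]
  rw [show (1:Int) + (p:Int) - 1 = ((p:Nat):Int) by ring]
  rw [show (1:Int) + (p:Int) + 1 = ((p+2:Nat):Int) by push_cast; ring]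
  rw [show (1:Int) + (p:Int) = ((p+1:Nat):Int) by push_cast; ring]
  rw [show (1:Int) + (q:Int) - 1 = ((q:Nat):Int) by ring]
  rw [show (1:Int) + (q:Int) + 1 = ((q+2:Nat):Int) by push_cast; ring]
  rw [show (1:Int) + (q:Int) = ((q+1:Nat):Int) by push_cast; ring]
  rw [show ((q:Int)) + 1 = ((q+1:Nat):Int) by push_cast; ring]
  simp only [PySem.List.pyGetD_natCast]
  rw [maskM_getD T p q (by omega) (by omega),
      maskM_getD T p (q+1) (by omega) (by omega),
      maskM_getD T p (q+2) (by omega) (by omega),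
      maskM_getD T (p+1) q (by omega) (by omega),
      maskM_getD T (p+1) (q+1) (by omega) (by omega),
      maskM_getD T (p+1) (q+2) (by omega) (by omega),
      maskM_getD T (p+2) q (by omega) (by omega),
      maskM_getD T (p+2) (q+1) (by omega) (by omega),
      maskM_getD T (p+2) (q+2) (by omega) (by omega)]
  rw [RB_getD T hPre p q (by omega) (by omega),
      RB_getD T hPre (p+1) q (by omega) (by omega),
      RB_getD T hPre (p+2) q (by omega) (by omega),
      LB_getD T hPre (p+1) (q+1) (by omega) (by omega)]
  refine if_congr ?_ rfl rfl
  omega
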